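-- pv_equiv track=rewrite | github.com/alberto-upm/KGE_master_tesis | src/phase4_incident_creator.py | find_matching_incidents
-- ===== SOURCE A (Python) =====
-- def find_matching_incidents(known_props: dict, incidents_map: dict) -> list[str]:
--     """
--     Devuelve las incident_ids cuyas propiedades coinciden con known_props.
--     Empieza exigiendo que TODAS las propiedades conocidas coincidan; si
--     obtiene menos de 3 resultados, relaja el umbral en 1 hasta mínimo 1.
--     """
--     filled = {k: v for k, v in known_props.items() if v is not None}
--     if not filled:
--         return []
--     matches = []
--     for threshold in range(len(filled), 0, -1):
--         matches = [
--             inc_id for inc_id, props in incidents_map.items()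
--             if sum(1 for k, v in filled.items() if v in props.get(k, [])) >= threshold
--         ]
--         if len(matches) >= 3:
--             return matches
--     return matches
-- ===== SOURCE B (Python) =====
-- def find_matching_incidents(known_props: dict, incidents_map: dict) -> list[str]:
--     filled = {k: v for k, v in known_props.items() if v is not None}
--     F = len(filled)
--     if F == 0:
--         return []
--     # One pass: each incident's match count, computed once.
--     counts = {inc_id: len([k for k, v in filled.items() if v in props.get(k, [])])
--               for inc_id, props in incidents_map.items()}
--     # Histogram of counts; walk it from F down, accumulating how many incidents
--     # reach each threshold, to pick the final threshold directly.
--     hist = [0] * (F + 1)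
--     for c in counts.values():
--         hist[c] += 1
--     threshold = 1
--     ge = 0
--     for t in range(F, 0, -1):
--         ge += hist[t]
--         if ge >= 3:
--             threshold = t
--             break
--     return [inc_id for inc_id, c in counts.items() if c >= threshold]
-- ===== Notes on version B (the rewrite author's own statement) =====
-- stated objective: faster
-- what changed: B computes each incident's match count once, buckets the counts into a histogram, picks the final threshold with a single countdown over the histogram, and produces the result with one final filter, instead of A's re-scan of every incident's properties at every threshold level.
import Mathlib
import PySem

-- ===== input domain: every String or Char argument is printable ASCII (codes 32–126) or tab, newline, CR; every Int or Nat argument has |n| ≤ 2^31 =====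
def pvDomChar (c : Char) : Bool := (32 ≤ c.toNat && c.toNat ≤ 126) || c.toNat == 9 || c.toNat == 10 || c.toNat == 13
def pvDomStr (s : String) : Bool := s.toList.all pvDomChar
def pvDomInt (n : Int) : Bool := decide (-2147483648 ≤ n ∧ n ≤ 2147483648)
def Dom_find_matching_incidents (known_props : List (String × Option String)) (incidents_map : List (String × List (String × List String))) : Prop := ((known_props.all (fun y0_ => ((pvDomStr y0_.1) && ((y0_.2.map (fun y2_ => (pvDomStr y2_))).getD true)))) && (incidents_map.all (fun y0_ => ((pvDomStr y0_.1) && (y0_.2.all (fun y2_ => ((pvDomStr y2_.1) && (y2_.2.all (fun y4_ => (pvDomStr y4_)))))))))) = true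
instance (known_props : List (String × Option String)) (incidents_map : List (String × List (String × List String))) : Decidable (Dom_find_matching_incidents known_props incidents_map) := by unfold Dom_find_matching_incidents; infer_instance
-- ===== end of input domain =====

-- B computes each incident's match count once, buckets the counts into a histogram, picks the
-- final threshold by one countdown over the histogram, and filters once (faster than A's rescan
-- of every incident's properties at every threshold level).

-- ===== PORT A =====
-- filled = {k: v for k, v in known_props.items() if v is not None}  (shared: identical line in both Pythons)
def fmiFilled (known_props : List (String × Option String)) : List (String × String) :=
  (PySem.Dict.ofList known_props).items.filterMap (fun p => p.2.map (fun v => (p.1, v)))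

-- sum(1 for k, v in filled.items() if v in props.get(k, []))
def fmiCount (filled : List (String × String)) (props : PySem.Dict String (List String)) : Int :=
  filled.foldl (fun acc kv => if kv.2 ∈ props.getD kv.1 [] then acc + 1 else acc) 0

-- A's threshold loop: recompute the matches list from the incidents at each threshold
def fmiLoopA (filled : List (String × String)) (incs : List (String × PySem.Dict String (List String))) :
    List Int → List String → List String
  | [], acc => acc
  | t :: rest, _ =>
      let m := (incs.filter (fun p => decide (t ≤ fmiCount filled p.2))).map (·.1)
      if 3 ≤ m.length then m else fmiLoopA filled incs rest m

def find_matching_incidents (known_props : List (String × Option String)) (incidents_map : List (String × List (String × List String))) : List String :=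
  let filled := fmiFilled known_props
  if filled.isEmpty then []
  else
    let incs := (PySem.Dict.ofList incidents_map).items.map (fun p => (p.1, PySem.Dict.ofList p.2))
    fmiLoopA filled incs (PySem.List.pyRange (filled.length : Int) 0 (-1)) []

-- ===== PORT B =====
-- len([k for k, v in filled.items() if v in props.get(k, [])])
def fmiCountN (filled : List (String × String)) (props : PySem.Dict String (List String)) : Nat :=
  (filled.filter (fun kv => kv.2 ∈ props.getD kv.1 [])).length

-- hist = [0]*(F+1); for c in counts.values(): hist[c] += 1
def fmiHist (vs : List Nat) (F : Nat) : List Nat :=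
  vs.foldl (fun h c => h.set c (h.getD c 0 + 1)) (List.replicate (F + 1) 0)

-- ge = 0; for t in range(F, 0, -1): ge += hist[t]; if ge >= 3: threshold = t; break  (else threshold = 1)
def fmiPick (hist : List Nat) : Nat → Nat → Nat
  | 0, _ => 1
  | t + 1, ge =>
      let g := ge + hist.getD (t + 1) 0
      if 3 ≤ g then t + 1 else fmiPick hist t g

def find_matching_incidents_alt (known_props : List (String × Option String)) (incidents_map : List (String × List (String × List String))) : List String :=
  let filled := fmiFilled known_props
  if filled.isEmpty then []
  else
    -- counts is a dict comprehension over a dict's items (keys already unique), hence a plain map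
    let counts := (PySem.Dict.ofList incidents_map).items.map
      (fun p => (p.1, fmiCountN filled (PySem.Dict.ofList p.2)))
    let hist := fmiHist (counts.map (·.2)) filled.length
    let T := fmiPick hist filled.length 0
    (counts.filter (fun p => decide (T ≤ p.2))).map (·.1)

-- ===== PRECONDITION & SPEC =====
def Spec_find_matching_incidents (known_props : List (String × Option String)) (incidents_map : List (String × List (String × List String))) (out : List String) : Prop := out = find_matching_incidents_alt known_props incidents_map
instance (known_props : List (String × Option String)) (incidents_map : List (String × List (String × List String))) (out : List String) : Decidable (Spec_find_matching_incidents known_props incidents_map out) := by unfold Spec_find_matching_incidents; infer_instance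

-- ===== CLAIM (what is proved, stated in full; the proofs are below) =====
def Claim_equal_find_matching_incidents : Prop := ∀ (known_props : List (String × Option String)) (incidents_map : List (String × List (String × List String))), Dom_find_matching_incidents known_props incidents_map → Spec_find_matching_incidents known_props incidents_map (find_matching_incidents known_props incidents_map)

-- ===== LEMMAS AND PROOFS =====

-- A's fold-with-counter is B's filter length
lemma fmiCount_eq (filled : List (String × String)) (d : PySem.Dict String (List String)) :
    fmiCount filled d = (fmiCountN filled d : Int) := by
  have h : ∀ (l : List (String × String)) (acc : Int),
      l.foldl (fun acc kv => if kv.2 ∈ d.getD kv.1 [] then acc + 1 else acc) acc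
        = acc + ((l.filter (fun kv => kv.2 ∈ d.getD kv.1 [])).length : Int) := by
    intro l
    induction l with
    | nil => intro acc; simp
    | cons x xs ih =>
        intro acc
        by_cases hx : x.2 ∈ d.getD x.1 []
        · simp [hx, ih]; try omega
        · simp [hx, ih]
  simpa [fmiCount, fmiCountN] using h filled 0

-- A's per-threshold comprehension is B's filter over the precomputed counts
lemma fmi_filter_counts (filled : List (String × String))
    (incs : List (String × PySem.Dict String (List String))) (t : Nat) :
    (incs.filter (fun p => decide ((t : Int) ≤ fmiCount filled p.2))).map (·.1)
      = ((incs.map (fun p => (p.1, fmiCountN filled p.2))).filter (fun p => decide (t ≤ p.2))).map (·.1) := by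
  induction incs with
  | nil => rfl
  | cons h tl ih =>
      by_cases ht : t ≤ fmiCountN filled h.2
      · have : (t : Int) ≤ fmiCount filled h.2 := by rw [fmiCount_eq]; exact_mod_cast ht
        simp [ht, this, ih]
      · have : ¬ (t : Int) ≤ fmiCount filled h.2 := by rw [fmiCount_eq]; exact_mod_cast ht
        simp [ht, this, ih]

-- the histogram counts occurrences, provided every value fits
lemma fmiHist_getD (vs : List Nat) (F : Nat) (hb : ∀ c ∈ vs, c ≤ F) (i : Nat) :
    (fmiHist vs F).getD i 0 = vs.count i := by
  have h : ∀ (l : List Nat) (base : List Nat), (∀ c ∈ l, c < base.length) → ∀ i,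
      (l.foldl (fun h c => h.set c (h.getD c 0 + 1)) base).getD i 0
        = base.getD i 0 + l.count i := by
    intro l
    induction l with
    | nil => intro base _ i; simp
    | cons c tl ih =>
        intro base hlt i
        have hc : c < base.length := hlt c List.mem_cons_self
        have hstep : (base.set c (base.getD c 0 + 1)).getD i 0
            = base.getD i 0 + (if c = i then 1 else 0) := by
          by_cases hic : c = i
          · subst hic
            rw [if_pos rfl, List.getD, List.getElem?_set_eq_of_lt _ hc]
            rfl
          · rw [if_neg hic]
            simp [List.getD, List.getElem?_set_ne hic]
        rw [List.foldl_cons,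
            ih _ (fun x hx => by rw [List.length_set]; exact hlt x (List.mem_cons_of_mem _ hx)) i,
            hstep, List.count_cons]
        by_cases hic : c = i
        · subst hic; simp; try omega
        · simp [hic]
  rw [fmiHist, h vs _ (fun c hc => by simpa using Nat.lt_succ_of_le (hb c hc)) i]
  simp

-- splitting the "count ≥ t+1" filter into "count = t+1" and "count > t+1"
lemma fmi_filter_split (vs : List Nat) (t : Nat) :
    (vs.filter (fun c => decide (t + 1 ≤ c))).length
      = vs.count (t + 1) + (vs.filter (fun c => decide (t + 1 < c))).length := by
  induction vs with
  | nil => simp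
  | cons c tl ih =>
      rw [List.filter_cons, List.filter_cons, List.count_cons]
      by_cases h1 : t + 1 ≤ c
      · by_cases h2 : t + 1 < c
        · rw [if_pos (by simpa using h1), if_neg (by simpa using (show ¬ c = t + 1 by omega)),
              if_pos (by simpa using h2)]
          simp only [List.length_cons]
          omega
        · rw [if_pos (by simpa using h1), if_pos (by simpa using (show c = t + 1 by omega)),
              if_neg (by simpa using h2)]
          simp only [List.length_cons]
          omega
      · rw [if_neg (by simpa using h1), if_neg (by simpa using (show ¬ c = t + 1 by omega)),
            if_neg (by simpa using (show ¬ t + 1 < c by omega))]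
        omega

-- the two programs' loops: A's countdown rescan equals one filter at B's picked threshold
lemma fmi_loop_eq (filled : List (String × String))
    (incs : List (String × PySem.Dict String (List String)))
    (counts : List (String × Nat)) (hc : counts = incs.map (fun p => (p.1, fmiCountN filled p.2)))
    (F : Nat) (hb : ∀ c ∈ counts.map (·.2), c ≤ F) :
    ∀ (t : Nat) (ge : Nat) (m : List String),
      ge = ((counts.map (·.2)).filter (fun c => decide (t < c))).length →
      fmiLoopA filled incs (PySem.List.pyRange (t : Int) 0 (-1)) m
        = if t = 0 then m
          else (counts.filter (fun p => decide (fmiPick (fmiHist (counts.map (·.2)) F) t ge ≤ p.2))).map (·.1) := by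
  intro t
  induction t with
  | zero =>
      intro ge m _
      rw [PySem.List.pyRange_neg_one_eq_nil (by norm_num)]
      simp [fmiLoopA]
  | succ t ih =>
      intro ge m hge
      have hcons : PySem.List.pyRange ((t + 1 : Nat) : Int) 0 (-1)
          = ((t + 1 : Nat) : Int) :: PySem.List.pyRange ((t : Nat) : Int) 0 (-1) := by
        rw [PySem.List.pyRange_neg_one_cons (by positivity)]
        norm_num
      rw [hcons]
      simp only [fmiLoopA]
      rw [fmi_filter_counts, ← hc]
      have hg : ge + (fmiHist (counts.map (·.2)) F).getD (t + 1) 0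
          = ((counts.map (·.2)).filter (fun c => decide (t + 1 ≤ c))).length := by
        rw [fmiHist_getD _ _ hb, fmi_filter_split, hge]
        omega
      have hlen : ((counts.filter (fun p => decide (t + 1 ≤ p.2))).map (·.1)).length
          = ((counts.map (·.2)).filter (fun c => decide (t + 1 ≤ c))).length := by
        rw [List.filter_map]
        simp [Function.comp_def]
      have hpe : (fun c : Nat => decide (t < c)) = (fun c : Nat => decide (t + 1 ≤ c)) := by
        funext c
        by_cases h : t < c
        · rw [decide_eq_true h, decide_eq_true (show t + 1 ≤ c by omega)]
        · rw [decide_eq_false h, decide_eq_false (show ¬ t + 1 ≤ c by omega)]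
      simp only [fmiPick, Nat.succ_ne_zero, if_false, hlen, hg]
      by_cases h3 : 3 ≤ ((counts.map (·.2)).filter (fun c => decide (t + 1 ≤ c))).length
      · simp only [if_pos h3]
      · simp only [if_neg h3]
        have hinv : ((counts.map (·.2)).filter (fun c => decide (t + 1 ≤ c))).length
            = ((counts.map (·.2)).filter (fun c => decide (t < c))).length := by
          rw [hpe]
        rw [ih _ _ hinv]
        cases t with
        | zero =>
            rw [if_pos rfl]
            apply congrArg
            apply List.filter_congr
            intro p _
            norm_num [fmiPick]
        | succ s => rw [if_neg (Nat.succ_ne_zero s)]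

-- each count is at most the number of filled properties
lemma fmiCountN_le (filled : List (String × String)) (d : PySem.Dict String (List String)) :
    fmiCountN filled d ≤ filled.length :=
  List.length_filter_le _ _

-- ===== VERDICT (by name: the statement is the Claim_ definition above) =====
theorem find_matching_incidents_spec : Claim_equal_find_matching_incidents := by
  intro known_props incidents_map _
  unfold Spec_find_matching_incidents find_matching_incidents find_matching_incidents_alt
  by_cases hf : (fmiFilled known_props).isEmpty
  · simp [hf]
  · simp only [hf]
    set filled := fmiFilled known_props with hfil
    set incs := (PySem.Dict.ofList incidents_map).items.map (fun p => (p.1, PySem.Dict.ofList p.2)) with hincs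
    have hc : (PySem.Dict.ofList incidents_map).items.map
        (fun p => (p.1, fmiCountN filled (PySem.Dict.ofList p.2)))
        = incs.map (fun p => (p.1, fmiCountN filled p.2)) := by
      rw [hincs, List.map_map]
      rfl
    have hne : filled ≠ [] := by simpa [List.isEmpty_iff] using hf
    have hpos : 0 < filled.length := List.length_pos_of_ne_nil hne
    rw [hc]
    set counts := incs.map (fun p => (p.1, fmiCountN filled p.2)) with hcounts
    have hb : ∀ c ∈ counts.map (·.2), c ≤ filled.length := by
      intro c hcmem
      simp only [hcounts, List.map_map, List.mem_map] at hcmem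
      obtain ⟨p, _, hp⟩ := hcmem
      rw [← hp]
      exact fmiCountN_le filled p.2
    have hinv : (0 : Nat) = ((counts.map (·.2)).filter (fun c => decide (filled.length < c))).length := by
      rw [List.filter_eq_nil_iff.mpr (fun c hcmem => by simpa using Nat.not_lt.mpr (hb c hcmem))]
      rfl
    rw [fmi_loop_eq filled incs counts hcounts filled.length hb filled.length 0 [] hinv,
        if_neg (Nat.pos_iff_ne_zero.mp hpos)]
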